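-- pv_equiv track=rewrite | github.com/klinkin/pythonchik | pythonchik/services.py | extract_barcodes
-- ===== SOURCE A (Python) =====
-- from typing import Any, Dict, List, Tuple
--
-- def extract_barcodes(data: Dict[str, Any]) -> List[str]:
--     """Извлечь уникальные штрих-коды из предложений."""
--     barcodes = []
--     for offer in data.get("offers", []):
--         try:
--             if offer["barcode"] not in barcodes and len(offer["barcode"]) > 5:
--                 barcodes.append(offer["barcode"])
--         except KeyError:
--             continue
--     return barcodes
-- ===== SOURCE B (Python) =====
-- def extract_barcodes(data):
--     """Извлечь уникальные штрих-коды из предложений."""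
--     candidates = [o["barcode"] for o in data.get("offers", [])
--                   if "barcode" in o and len(o["barcode"]) > 5]
--     return [b for i, b in enumerate(candidates) if b not in candidates[:i]]
-- ===== Notes on version B (the rewrite author's own statement) =====
-- stated objective: alternative
-- what changed: Replaces A's stateful loop (try/except, accumulator list, membership test against the growing result) by two comprehensions: one filtering pass collecting long-enough barcodes, then a stateless first-occurrence dedup that keeps candidates[i] iff it is absent from the prefix candidates[:i].
import Mathlib
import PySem

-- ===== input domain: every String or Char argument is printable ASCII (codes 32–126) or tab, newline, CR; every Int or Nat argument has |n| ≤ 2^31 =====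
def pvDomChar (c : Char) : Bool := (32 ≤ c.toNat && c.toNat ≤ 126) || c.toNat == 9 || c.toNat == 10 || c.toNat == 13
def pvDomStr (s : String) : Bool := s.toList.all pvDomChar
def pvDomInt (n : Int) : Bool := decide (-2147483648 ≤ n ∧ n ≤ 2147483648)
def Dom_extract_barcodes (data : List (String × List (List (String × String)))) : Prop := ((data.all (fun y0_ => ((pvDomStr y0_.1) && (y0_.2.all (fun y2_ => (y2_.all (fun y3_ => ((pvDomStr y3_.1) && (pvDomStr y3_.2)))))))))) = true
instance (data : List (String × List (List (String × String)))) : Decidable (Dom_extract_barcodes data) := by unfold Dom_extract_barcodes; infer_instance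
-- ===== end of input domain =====

-- B: two stateless comprehensions (filter pass, then prefix-based first-occurrence dedup) instead of A's stateful accumulator loop; alternative decomposition, same asymptotic cost.


-- ===== PORT A =====
-- single pass: membership test against the growing result list inside the loop; KeyError => continue
def extract_barcodes (data : List (String × List (List (String × String)))) : List String :=
  ((List.lookup "offers" data).getD []).foldl
    (fun barcodes offer =>
      match List.lookup "barcode" offer with
      | none => barcodes            -- except KeyError: continue
      | some b => if b ∉ barcodes ∧ PySem.Str.len b > 5 then barcodes ++ [b] else barcodes)
    []

-- ===== PORT B =====
-- comprehension 1: candidates = [o["barcode"] for o in offers if "barcode" in o and len(o["barcode"]) > 5]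
-- comprehension 2: [b for i, b in enumerate(candidates) if b not in candidates[:i]]
def extract_barcodes_alt (data : List (String × List (List (String × String)))) : List String :=
  let candidates :=
    ((List.lookup "offers" data).getD []).filterMap (fun o =>
      match List.lookup "barcode" o with            -- '"barcode" in o' guard + o["barcode"]
      | some b => if PySem.Str.len b > 5 then some b else none
      | none => none)
  (PySem.List.enumerate candidates 0).filterMap (fun p =>
    if p.2 ∈ PySem.List.slice candidates (some 0) (some p.1) then none else some p.2)

-- ===== PRECONDITION & SPEC =====
def Spec_extract_barcodes (data : List (String × List (List (String × String)))) (out : List String) : Prop := out = extract_barcodes_alt data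
instance (data : List (String × List (List (String × String)))) (out : List String) : Decidable (Spec_extract_barcodes data out) := by unfold Spec_extract_barcodes; infer_instance

-- ===== CLAIM (what is proved, stated in full; the proofs are below) =====
def Claim_equal_extract_barcodes : Prop := ∀ (data : List (String × List (List (String × String)))), Dom_extract_barcodes data → Spec_extract_barcodes data (extract_barcodes data)

-- ===== LEMMAS AND PROOFS =====

-- the long-enough barcodes of a list of offers, in order
def pvCands (offers : List (List (String × String))) : List String :=
  offers.filterMap (fun o =>
    match List.lookup "barcode" o with
    | some b => if PySem.Str.len b > 5 then some b else none
    | none => none)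

-- first-occurrence dedup of l, dropping elements already in the seen-prefix pre
def seenDedup : List String → List String → List String
  | _, [] => []
  | pre, x :: xs => if x ∈ pre then seenDedup pre xs else x :: seenDedup (pre ++ [x]) xs

-- seenDedup only looks at the seen-prefix through membership
lemma seenDedup_congr (xs : List String) : ∀ (pre pre' : List String),
    (∀ y, y ∈ pre → y ∈ pre') → (∀ y, y ∈ pre' → y ∈ pre) → seenDedup pre xs = seenDedup pre' xs := by
  induction xs with
  | nil => intro _ _ _ _; rfl
  | cons z zs ih =>
    intro pre pre' h1 h2
    by_cases hz : z ∈ pre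
    · rw [seenDedup, if_pos hz, seenDedup, if_pos (h1 z hz)]
      exact ih pre pre' h1 h2
    · rw [seenDedup, if_neg hz, seenDedup, if_neg (fun h => hz (h2 z h))]
      exact congrArg (z :: ·) (ih (pre ++ [z]) (pre' ++ [z])
        (fun y hy => by rcases List.mem_append.1 hy with h | h
                        · exact List.mem_append.2 (Or.inl (h1 y h))
                        · exact List.mem_append.2 (Or.inr h))
        (fun y hy => by rcases List.mem_append.1 hy with h | h
                        · exact List.mem_append.2 (Or.inl (h2 y h))
                        · exact List.mem_append.2 (Or.inr h)))

-- A's loop computes acc ++ seenDedup acc (pvCands offers)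
lemma pvA_fold (offers : List (List (String × String))) (acc : List String) :
    offers.foldl
      (fun barcodes offer =>
        match List.lookup "barcode" offer with
        | none => barcodes
        | some b => if b ∉ barcodes ∧ PySem.Str.len b > 5 then barcodes ++ [b] else barcodes)
      acc = acc ++ seenDedup acc (pvCands offers) := by
  induction offers generalizing acc with
  | nil => simp [pvCands, seenDedup]
  | cons o os ih =>
    rw [List.foldl_cons]
    simp only [pvCands, List.filterMap_cons]
    cases List.lookup "barcode" o with
    | none => exact ih acc
    | some b =>
      dsimp only
      by_cases hlen : PySem.Str.len b > 5
      · rw [if_pos hlen]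
        by_cases hm : b ∈ acc
        · rw [if_neg (by simp [hm]), ih, seenDedup, if_pos hm]; rfl
        · rw [if_pos ⟨hm, hlen⟩, ih, seenDedup, if_neg hm]
          simp [pvCands]
      · rw [if_neg hlen, if_neg (by tauto), ih]; rfl

-- B's second comprehension, started after a seen prefix pre, is seenDedup pre l
lemma pvB_enum (l pre : List String) :
    (PySem.List.enumerate l (pre.length : Int)).filterMap
      (fun p => if p.2 ∈ PySem.List.slice (pre ++ l) (some 0) (some p.1) then none else some p.2)
    = seenDedup pre l := by
  induction l generalizing pre with
  | nil => simp [PySem.List.enumerate_nil, seenDedup]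
  | cons x xs ih =>
    rw [PySem.List.enumerate_cons, List.filterMap_cons]
    have hsl : PySem.List.slice (pre ++ x :: xs) (some 0) (some (pre.length : Int)) = pre := by
      rw [PySem.List.slice_zero_start, PySem.List.slice_to_natCast]
      exact List.take_left
    have hpre : pre ++ x :: xs = (pre ++ [x]) ++ xs := by simp
    have hlen : (pre.length : Int) + 1 = ((pre ++ [x]).length : Int) := by
      simp [List.length_append]
    have htail :
        (PySem.List.enumerate xs ((pre.length : Int) + 1)).filterMap
          (fun p => if p.2 ∈ PySem.List.slice (pre ++ x :: xs) (some 0) (some p.1) then none else some p.2)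
        = seenDedup (pre ++ [x]) xs := by
      rw [hpre, hlen]; exact ih (pre ++ [x])
    dsimp only
    rw [hsl, htail, seenDedup]
    by_cases hm : x ∈ pre
    · rw [if_pos hm, if_pos hm]
      exact seenDedup_congr xs (pre ++ [x]) pre
        (fun y hy => by rcases List.mem_append.1 hy with h | h
                        · exact h
                        · simpa using (List.mem_singleton.1 h) ▸ hm)
        (fun y hy => List.mem_append.2 (Or.inl hy))
    · rw [if_neg hm, if_neg hm]

-- ===== VERDICT (by name: the statement is the Claim_ definition above) =====
theorem extract_barcodes_spec : Claim_equal_extract_barcodes := by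
  intro data _
  unfold Spec_extract_barcodes extract_barcodes extract_barcodes_alt
  rw [pvA_fold]
  have h := pvB_enum
    (pvCands ((List.lookup "offers" data).getD []))
    []
  simpa [pvCands] using h.symm
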